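-- pv_equiv track=rewrite | github.com/WonjunChun/BOJAlgorithm | Greedy/1202_jewelry_thief.py | jewelry_thief
-- ===== SOURCE A (Python) =====
-- def jewelry_thief(jewels: list, bags: list) -> int: # 훔칠 수 있는 보석 가격의 합의 최대값 반환
--     jewels.sort(key=lambda x:x[1], reverse=True) # 가격 높은 순으로 정렬
--     bags.sort() # 담을 수 있는 무게 작은 순으로 정렬
--     total_weight = 0
--
--     for j in jewels:
--         if bags == []: break # 보석 넣을 가방이 존재하지 않으면, 종료
--         for b in range(len(bags)):
--             if bags[b] >= j[0]:
--                 total_weight += j[1]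
--                 bags.pop(b) # 이미 사용한 가방은 목록에서 제거
--                 break # bags 탐색 중단
--
--     return total_weight
-- ===== SOURCE B (Python) =====
-- def jewelry_thief(jewels: list, bags: list) -> int:
--     # Bag-major greedy: visit bags (smallest first), give each bag the most
--     # valuable jewel that still fits it.  (Does not mutate the arguments,
--     # unlike A, which sorts both lists and pops from bags in place.)
--     remaining = sorted(jewels, key=lambda j: j[1], reverse=True)
--     total = 0
--     for cap in sorted(bags):
--         for i, (w, v) in enumerate(remaining):
--             if w <= cap:
--                 total += v
--                 del remaining[i]
--                 break
--     return total
-- ===== Notes on version B (the rewrite author's own statement) =====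
-- stated objective: alternative
-- what changed: A iterates jewels in decreasing value and scans for the smallest remaining bag that fits each; B runs the dual greedy: it iterates bag capacities in increasing order and gives each bag the most valuable remaining jewel that fits (and B does not mutate its arguments, while A sorts both lists and pops bags in place).
import Mathlib
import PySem

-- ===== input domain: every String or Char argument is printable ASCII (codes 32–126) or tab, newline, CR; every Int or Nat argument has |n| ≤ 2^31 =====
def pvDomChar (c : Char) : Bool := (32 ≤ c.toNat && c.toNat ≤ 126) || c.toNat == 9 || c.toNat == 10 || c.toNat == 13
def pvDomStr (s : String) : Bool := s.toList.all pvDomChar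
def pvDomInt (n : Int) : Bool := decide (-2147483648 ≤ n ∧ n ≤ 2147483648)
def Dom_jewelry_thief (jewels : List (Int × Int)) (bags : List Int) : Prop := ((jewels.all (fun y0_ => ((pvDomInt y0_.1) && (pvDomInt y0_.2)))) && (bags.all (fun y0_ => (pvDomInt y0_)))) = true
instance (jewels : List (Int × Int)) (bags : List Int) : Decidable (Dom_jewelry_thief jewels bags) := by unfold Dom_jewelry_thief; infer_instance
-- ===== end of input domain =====

-- B replaces A's jewel-major greedy (each jewel takes the smallest remaining fitting bag)
-- by the dual bag-major greedy (each bag, smallest first, takes the most valuable remaining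
-- fitting jewel); same cost, different traversal.  Equivalence is about the RETURN value
-- only: the Python A sorts both argument lists and pops from bags in place, B mutates nothing.

-- ===== PORT A =====
-- inner loop: 'for b in range(len(bags)): if bags[b] >= w: pop(b); break' — scan for the
-- first bag ≥ w, remove it (none = loop fell through without a fitting bag)
def aFindBag (w : Int) : List Int → Option (List Int)
  | [] => none
  | b :: rest => if b ≥ w then some rest else (aFindBag w rest).map (b :: ·)

-- outer loop over jewels, state = (remaining bags, total_weight); 'if bags == []: break'
def aLoop : List (Int × Int) → List Int → Int → Int
  | [], _, total => total
  | _ :: _, [], total => total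
  | (w, v) :: js, b :: bs, total =>
      match aFindBag w (b :: bs) with
      | some bags' => aLoop js bags' (total + v)
      | none => aLoop js (b :: bs) total

def jewelry_thief (jewels : List (Int × Int)) (bags : List Int) : Int :=
  aLoop (PySem.List.sorted jewels (fun x => x.2) true) (PySem.List.sorted bags (fun x => x) false) 0

-- ===== PORT B =====
-- 'for i, (w, v) in enumerate(remaining): if w <= cap: del remaining[i]; break' —
-- first (i.e. most valuable, list is value-descending) jewel fitting cap, removed
def bFindJewel (cap : Int) : List (Int × Int) → Option (Int × List (Int × Int))
  | [] => none
  | (w, v) :: rest =>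
      if w ≤ cap then some (v, rest)
      else (bFindJewel cap rest).map (fun p => (p.1, (w, v) :: p.2))

-- outer loop over bag capacities, state = (remaining jewels, total)
def bLoop : List Int → List (Int × Int) → Int → Int
  | [], _, total => total
  | cap :: caps, js, total =>
      match bFindJewel cap js with
      | some (v, js') => bLoop caps js' (total + v)
      | none => bLoop caps js total

def jewelry_thief_alt (jewels : List (Int × Int)) (bags : List Int) : Int :=
  bLoop (PySem.List.sorted bags (fun x => x) false) (PySem.List.sorted jewels (fun x => x.2) true) 0

-- ===== PRECONDITION & SPEC =====
def Spec_jewelry_thief (jewels : List (Int × Int)) (bags : List Int) (out : Int) : Prop := out = jewelry_thief_alt jewels bags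
instance (jewels : List (Int × Int)) (bags : List Int) (out : Int) : Decidable (Spec_jewelry_thief jewels bags out) := by unfold Spec_jewelry_thief; infer_instance

-- ===== CLAIM (what is proved, stated in full; the proofs are below) =====
def Claim_equal_jewelry_thief : Prop := ∀ (jewels : List (Int × Int)) (bags : List Int), Dom_jewelry_thief jewels bags → Spec_jewelry_thief jewels bags (jewelry_thief jewels bags)

-- ===== LEMMAS AND PROOFS =====

theorem aLoop_nil (js : List (Int × Int)) (total : Int) : aLoop js [] total = total := by
  cases js with
  | nil => rfl
  | cons j js => rfl

theorem aLoop_cons (w v : Int) (js : List (Int × Int)) (b : Int) (bs : List Int) (total : Int) :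
    aLoop ((w, v) :: js) (b :: bs) total =
      match aFindBag w (b :: bs) with
      | some bags' => aLoop js bags' (total + v)
      | none => aLoop js (b :: bs) total := rfl

theorem aFindBag_cons (w b : Int) (bs : List Int) :
    aFindBag w (b :: bs) = if b ≥ w then some bs else (aFindBag w bs).map (b :: ·) := rfl

theorem bFindJewel_none {cap : Int} :
    ∀ {js : List (Int × Int)}, bFindJewel cap js = none → ∀ p ∈ js, ¬ p.1 ≤ cap := by
  intro js
  induction js with
  | nil => intro _ p hp; cases hp
  | cons j rest ih =>
    obtain ⟨w, v⟩ := j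
    intro h p hp
    by_cases hw : w ≤ cap
    · simp [bFindJewel, hw] at h
    · simp only [bFindJewel, if_neg hw, Option.map_eq_none_iff] at h
      rw [List.mem_cons] at hp
      rcases hp with rfl | hp
      · exact hw
      · exact ih h p hp

-- when no jewel fits cap, A never uses a bag of capacity cap either
theorem aLoop_skip_bag {cap : Int} :
    ∀ (js : List (Int × Int)) (bs : List Int) (total : Int),
      (∀ p ∈ js, ¬ p.1 ≤ cap) → aLoop js (cap :: bs) total = aLoop js bs total := by
  intro js
  induction js with
  | nil => intro bs total _; cases bs <;> rfl
  | cons j rest ih =>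
    obtain ⟨w, v⟩ := j
    intro bs total hall
    have hw : ¬ w ≤ cap := hall (w, v) (List.mem_cons_self ..)
    have hcw : ¬ cap ≥ w := fun h => hw (by omega)
    have hrest : ∀ p ∈ rest, ¬ p.1 ≤ cap := fun p hp => hall p (List.mem_cons_of_mem _ hp)
    cases bs with
    | nil =>
      rw [aLoop_cons, aFindBag_cons, if_neg hcw]
      show aLoop rest [cap] total = aLoop ((w, v) :: rest) [] total
      rw [ih [] total hrest, aLoop_nil, aLoop_nil]
    | cons b bs' =>
      rw [aLoop_cons, aLoop_cons, aFindBag_cons w cap, if_neg hcw]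
      cases hfb : aFindBag w (b :: bs') with
      | none => exact ih (b :: bs') total hrest
      | some bags' => exact ih bags' (total + v) hrest

-- the key duality step: a bag of capacity cap at the head of the bag list ends up matched,
-- in A's jewel-major run, to exactly the first jewel of js that fits it
theorem aLoop_use_bag {cap : Int} :
    ∀ (js : List (Int × Int)) (bs : List Int) (total v : Int) (js' : List (Int × Int)),
      bFindJewel cap js = some (v, js') →
      aLoop js (cap :: bs) total = aLoop js' bs (total + v) := by
  intro js
  induction js with
  | nil => intro bs total v js' h; simp [bFindJewel] at h
  | cons j rest ih =>
    obtain ⟨w, u⟩ := j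
    intro bs total v js' h
    by_cases hw : w ≤ cap
    · simp only [bFindJewel, if_pos hw, Option.some.injEq, Prod.mk.injEq] at h
      obtain ⟨rfl, rfl⟩ := h
      rw [aLoop_cons, aFindBag_cons, if_pos (show cap ≥ w by omega)]
    · simp only [bFindJewel, if_neg hw, Option.map_eq_some_iff] at h
      obtain ⟨⟨v₀, rest'⟩, hr, heq⟩ := h
      cases heq
      have hcw : ¬ cap ≥ w := fun hx => hw (by omega)
      rw [aLoop_cons, aFindBag_cons, if_neg hcw]
      cases hfb : aFindBag w bs with
      | none =>
        show aLoop rest (cap :: bs) total = aLoop ((w, u) :: rest') bs (total + v₀)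
        rw [ih bs total v₀ rest' hr]
        cases bs with
        | nil => rw [aLoop_nil, aLoop_nil]
        | cons b bs₂ => rw [aLoop_cons, hfb]
      | some bs'' =>
        show aLoop rest (cap :: bs'') (total + u) = aLoop ((w, u) :: rest') bs (total + v₀)
        rw [ih bs'' (total + u) v₀ rest' hr,
            show total + u + v₀ = total + v₀ + u from by ring]
        obtain ⟨b, bs₂, rfl⟩ : ∃ b bs₂, bs = b :: bs₂ := by
          cases bs with
          | nil => simp [aFindBag] at hfb
          | cons b bs₂ => exact ⟨b, bs₂, rfl⟩
        rw [aLoop_cons, hfb]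

-- A's jewel-major loop and B's bag-major loop compute the same total (for ANY lists)
theorem loop_duality :
    ∀ (bs : List Int) (js : List (Int × Int)) (total : Int),
      aLoop js bs total = bLoop bs js total := by
  intro bs
  induction bs with
  | nil => intro js total; rw [aLoop_nil, bLoop]
  | cons cap bs' ih =>
    intro js total
    cases hfj : bFindJewel cap js with
    | none =>
      rw [bLoop, hfj]
      rw [aLoop_skip_bag js bs' total (bFindJewel_none hfj), ih]
    | some p =>
      obtain ⟨v, js'⟩ := p
      rw [bLoop, hfj]
      rw [aLoop_use_bag js bs' total v js' hfj, ih]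

-- ===== VERDICT (by name: the statement is the Claim_ definition above) =====
theorem jewelry_thief_spec : Claim_equal_jewelry_thief := by
  intro jewels bags _
  show jewelry_thief jewels bags = jewelry_thief_alt jewels bags
  unfold jewelry_thief jewelry_thief_alt
  exact loop_duality _ _ 0
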